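-- pv_equiv track=rewrite | github.com/NikiMaslarski/HackBulgari_Programming101 | Week0/Day2/nth_fib_lists/solution.py | nth_fib_lists
-- ===== SOURCE A (Python) =====
-- def nth_fib_lists(listA, listB, n):
--     if n == 1:
--         return listA
--
--     previous = listA
--     current = listB
--     for i in range(2, n):
--         current, previous = current + previous, current
--     return current
-- ===== SOURCE B (Python) =====
-- def nth_fib_lists(listA, listB, n):
--     if n == 1:
--         return listA
--     if n < 3:
--         return listB
--     return nth_fib_lists(listA, listB, n - 1) + nth_fib_lists(listA, listB, n - 2)
-- ===== Notes on version B (the rewrite author's own statement) =====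
-- stated objective: alternative
-- what changed: Replaces A's bottom-up iterative loop keeping the two latest lists with a direct top-down recursive definition on n (naive recursion with two base cases).
import Mathlib
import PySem

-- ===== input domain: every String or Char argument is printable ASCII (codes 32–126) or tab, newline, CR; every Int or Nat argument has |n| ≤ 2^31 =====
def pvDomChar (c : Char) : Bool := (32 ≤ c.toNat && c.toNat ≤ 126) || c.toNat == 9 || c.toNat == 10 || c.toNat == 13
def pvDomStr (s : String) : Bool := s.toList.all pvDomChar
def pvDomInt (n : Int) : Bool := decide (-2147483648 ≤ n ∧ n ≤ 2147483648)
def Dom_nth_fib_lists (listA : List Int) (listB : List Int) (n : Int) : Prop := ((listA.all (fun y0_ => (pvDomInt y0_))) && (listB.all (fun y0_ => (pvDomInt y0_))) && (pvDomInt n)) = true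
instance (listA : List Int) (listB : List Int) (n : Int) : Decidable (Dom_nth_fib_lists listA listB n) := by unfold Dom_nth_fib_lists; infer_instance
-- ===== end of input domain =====

-- B replaces A's bottom-up iterative loop with a direct top-down recursion on n (alternative decomposition, not faster).


-- ===== PORT A =====
-- A: iterative bottom-up loop over range(2, n) keeping (previous, current).
def nth_fib_lists (listA : List Int) (listB : List Int) (n : Int) : List Int :=
  if n == 1 then listA
  else
    ((PySem.List.pyRange 2 n 1).foldl
      (fun (s : List Int × List Int) _ => (s.2, s.2 ++ s.1)) (listA, listB)).2

-- ===== PORT B =====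
-- B: direct top-down recursion on n (different decomposition; not faster).
def nth_fib_lists_alt (listA : List Int) (listB : List Int) (n : Int) : List Int :=
  if n == 1 then listA
  else if n < 3 then listB
  else nth_fib_lists_alt listA listB (n - 1) ++ nth_fib_lists_alt listA listB (n - 2)
termination_by n.toNat
decreasing_by all_goals · simp only [beq_iff_eq] at *; omega

-- ===== PRECONDITION & SPEC =====
def Spec_nth_fib_lists (listA : List Int) (listB : List Int) (n : Int) (out : List Int) : Prop := out = nth_fib_lists_alt listA listB n
instance (listA : List Int) (listB : List Int) (n : Int) (out : List Int) : Decidable (Spec_nth_fib_lists listA listB n out) := by unfold Spec_nth_fib_lists; infer_instance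

-- ===== CLAIM (what is proved, stated in full; the proofs are below) =====
def Claim_equal_nth_fib_lists : Prop := ∀ (listA : List Int) (listB : List Int) (n : Int), Dom_nth_fib_lists listA listB n → Spec_nth_fib_lists listA listB n (nth_fib_lists listA listB n)

-- ===== LEMMAS AND PROOFS =====

-- the loop body as a function of the state only (the loop index is unused)
def pvStep : (List Int × List Int) → (List Int × List Int) := fun s => (s.2, s.2 ++ s.1)

theorem pv_foldl_const {α β : Type} (f : α → α) (l : List β) (init : α) :
    l.foldl (fun s _ => f s) init = f^[l.length] init := by
  induction l generalizing init with
  | nil => rfl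
  | cons x xs ih => simp [List.foldl_cons, ih, Function.iterate_succ_apply]

theorem pvA_eval (listA listB : List Int) (n : Int) (h : n ≠ 1) :
    nth_fib_lists listA listB n = (pvStep^[(n - 2).toNat] (listA, listB)).2 := by
  unfold nth_fib_lists
  rw [if_neg (by simpa using h),
      show (fun (s : List Int × List Int) (_ : Int) => (s.2, s.2 ++ s.1)) = (fun s _ => pvStep s) from rfl,
      pv_foldl_const pvStep, PySem.List.length_pyRange_one]

theorem pvStep_snd (x : List Int × List Int) (k : Nat) :
    (pvStep^[k + 2] x).2 = (pvStep^[k + 1] x).2 ++ (pvStep^[k] x).2 := by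
  have h1 : pvStep^[k + 1] x = pvStep (pvStep^[k] x) := Function.iterate_succ_apply' pvStep k x
  have h2 : pvStep^[k + 2] x = pvStep (pvStep^[k + 1] x) := Function.iterate_succ_apply' pvStep (k + 1) x
  rw [h2, h1]
  rfl

theorem pv_main (listA listB : List Int) :
    ∀ (m : Nat) (n : Int), n.toNat ≤ m →
      nth_fib_lists listA listB n = nth_fib_lists_alt listA listB n := by
  intro m
  induction m with
  | zero =>
    intro n hn
    have h1 : n ≠ 1 := by omega
    have h3 : n < 3 := by omega
    rw [pvA_eval listA listB n h1, nth_fib_lists_alt,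
        if_neg (by simpa using h1), if_pos (by simpa using h3)]
    have : (n - 2).toNat = 0 := by omega
    rw [this]; rfl
  | succ m ih =>
    intro n hn
    by_cases h1 : n = 1
    · subst h1
      rw [nth_fib_lists, nth_fib_lists_alt]; rfl
    by_cases h3 : n < 3
    · rw [pvA_eval listA listB n h1, nth_fib_lists_alt,
          if_neg (by simpa using h1), if_pos (by simpa using h3)]
      have : (n - 2).toNat = 0 := by omega
      rw [this]; rfl
    · -- n ≥ 3
      rw [not_lt] at h3
      rw [nth_fib_lists_alt, if_neg (by simpa using h1), if_neg (by simpa using (by omega : ¬ n < 3))]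
      rw [← ih (n - 1) (by omega), ← ih (n - 2) (by omega)]
      by_cases h4 : n = 3
      · subst h4
        have hA3 : nth_fib_lists listA listB 3 = listB ++ listA := by
          rw [pvA_eval listA listB 3 (by norm_num),
              show ((3 : Int) - 2).toNat = 1 from rfl]
          rfl
        have hA2 : nth_fib_lists listA listB 2 = listB := by
          rw [pvA_eval listA listB 2 (by norm_num),
              show ((2 : Int) - 2).toNat = 0 from rfl]
          rfl
        have hA1 : nth_fib_lists listA listB 1 = listA := by
          rw [nth_fib_lists]; rfl
        norm_num
        rw [hA3, hA2, hA1]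
      · have hn4 : 4 ≤ n := by omega
        rw [pvA_eval listA listB n h1,
            pvA_eval listA listB (n - 1) (by omega),
            pvA_eval listA listB (n - 2) (by omega)]
        have e2 : (n - 2).toNat = (n - 4).toNat + 2 := by omega
        have e1 : (n - 1 - 2).toNat = (n - 4).toNat + 1 := by omega
        have e0 : (n - 2 - 2).toNat = (n - 4).toNat := by omega
        rw [e2, e1, e0, pvStep_snd]

-- ===== VERDICT (by name: the statement is the Claim_ definition above) =====
theorem nth_fib_lists_spec : Claim_equal_nth_fib_lists := by
  intro listA listB n _
  exact pv_main listA listB n.toNat n le_rfl
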